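-- pv_equiv track=rewrite | github.com/AP-MI-2021/lab-3-alexiahudea2003 | main.py | get_longest_all_not_prime
-- ===== SOURCE A (Python) =====
-- def is_prime(x):
--     '''
--     determina daca un nr. este prim
--     :param x: un numar intreg
--     :return: True, daca x este prim sau False in caz contrar
--     '''
--     if x < 2:
--         return False
--     for i in range(2, x//2 + 1):
--         if x % i == 0:
--             return False
--     return True
--
-- def not_prime(l):
--     '''
--     determina daca toate elementele unei liste sunt neprime
--     :param l: lista nr. intregi
--     :return: True, daca proprietatea e adevarata, False in caz contrar
--     '''
--     for x in l:
--         if is_prime(x):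
--             return False
--     return True
--
-- def get_longest_all_not_prime(l):
--     '''
--     determina cea mai lunga subsecventa de nr. neprime dintr-o lista
--     :param l: lista de nr. intregi
--     :return: cea mai lunga subsecventa de nr. neprime
--     '''
--     secventa_finala = []
--     lungime_maxima = 0
--     for i in range(len(l)):
--         for j in range(i, len(l)):
--             secventa_initiala = l[i:j+1]
--             if len(secventa_initiala) > lungime_maxima and not_prime(secventa_initiala):
--                 lungime_maxima = len(secventa_initiala)
--                 secventa_finala = secventa_initiala
--     return secventa_finala
-- ===== SOURCE B (Python) =====
-- def is_prime(x):
--     # same primality helper as the original module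
--     if x < 2:
--         return False
--     for i in range(2, x // 2 + 1):
--         if x % i == 0:
--             return False
--     return True
--
-- def get_longest_all_not_prime(l):
--     # single backward scan: run = length of the non-prime run starting at i;
--     # '>=' keeps the earliest longest run (same tie-breaking as the original)
--     best_start, best_len, run = 0, 0, 0
--     for i in range(len(l) - 1, -1, -1):
--         run = 0 if is_prime(l[i]) else run + 1
--         if run >= best_len:
--             best_start, best_len = i, run
--     return l[best_start:best_start + best_len]
-- ===== Notes on version B (the rewrite author's own statement) =====
-- stated objective: faster
-- what changed: Replaced the O(n^2)-subsequence enumeration with re-scanned primality checks by a single backward scan that tracks the length of the non-prime run starting at each index and keeps the earliest longest run, slicing it out once at the end.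
import Mathlib
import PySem

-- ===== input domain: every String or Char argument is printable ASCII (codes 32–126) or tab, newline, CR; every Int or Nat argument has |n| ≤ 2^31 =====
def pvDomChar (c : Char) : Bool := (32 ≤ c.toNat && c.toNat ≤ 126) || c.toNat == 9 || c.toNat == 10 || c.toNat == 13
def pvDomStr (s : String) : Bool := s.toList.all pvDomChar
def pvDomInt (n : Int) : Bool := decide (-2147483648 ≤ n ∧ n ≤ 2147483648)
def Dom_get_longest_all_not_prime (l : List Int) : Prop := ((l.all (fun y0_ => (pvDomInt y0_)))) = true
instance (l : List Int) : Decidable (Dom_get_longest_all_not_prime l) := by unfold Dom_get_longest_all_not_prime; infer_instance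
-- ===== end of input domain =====

-- B replaces A's O(n^2) enumeration of slices (each re-checked for primality) by one
-- backward scan tracking the non-prime run length starting at each index; objective: faster.

-- ===== PORT A =====
-- is_prime: the primality helper used verbatim by both Source A and Source B.
-- The 'for i in range(2, x//2+1)' loop with early 'return False' is ported as a
-- counter recursion (fuel = number of remaining loop iterations), exact for every x.
def pyIsPrimeLoop (x : Int) (i : Int) : Nat → Bool
  | 0 => true
  | fuel + 1 => if PySem.Int.mod x i == 0 then false else pyIsPrimeLoop x (i + 1) fuel

def pyIsPrime (x : Int) : Bool :=
  if x < 2 then false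
  else pyIsPrimeLoop x 2 (PySem.Int.floordiv x 2 + 1 - 2).toNat

-- not_prime: True iff no element of the list is prime
def pyNotPrime (l : List Int) : Bool := l.all (fun x => !pyIsPrime x)

def get_longest_all_not_prime (l : List Int) : List Int :=
  ((PySem.List.pyRange 0 (l.length : Int) 1).foldl (fun (st : List Int × Int) i =>
      (PySem.List.pyRange i (l.length : Int) 1).foldl (fun (st : List Int × Int) j =>
        let s := PySem.List.slice l (some i) (some (j + 1))
        if (s.length : Int) > st.2 ∧ pyNotPrime s = true then (s, (s.length : Int)) else st)
        st)
    ([], 0)).1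

-- ===== PORT B =====
def get_longest_all_not_prime_alt (l : List Int) : List Int :=
  let st := (PySem.List.pyRange ((l.length : Int) - 1) (-1) (-1)).foldl
    (fun (st : Int × Int × Int) i =>
      let run := if pyIsPrime (PySem.List.pyGetD l i 0) then 0 else st.2.2 + 1
      if run ≥ st.2.1 then (i, run, run) else (st.1, st.2.1, run))
    (0, 0, 0)
  PySem.List.slice l (some st.1) (some (st.1 + st.2.1))

-- ===== PRECONDITION & SPEC =====
def Spec_get_longest_all_not_prime (l : List Int) (out : List Int) : Prop := out = get_longest_all_not_prime_alt l
instance (l : List Int) (out : List Int) : Decidable (Spec_get_longest_all_not_prime l out) := by unfold Spec_get_longest_all_not_prime; infer_instance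

-- ===== CLAIM (what is proved, stated in full; the proofs are below) =====
def Claim_equal_get_longest_all_not_prime : Prop := ∀ (l : List Int), Dom_get_longest_all_not_prime l → Spec_get_longest_all_not_prime l (get_longest_all_not_prime l)

-- ===== LEMMAS AND PROOFS =====

-- length of the non-prime run at the head of a list
def runNP : List Int → Nat
  | [] => 0
  | x :: xs => if pyIsPrime x then 0 else runNP xs + 1

-- run length starting at (int) index i
def runAt (l : List Int) (i : Int) : Int := (runNP (l.drop i.toNat) : Int)

lemma runNP_le (xs : List Int) : runNP xs ≤ xs.length := by
  induction xs with
  | nil => simp [runNP]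
  | cons x xs ih => simp only [runNP, List.length_cons]; split <;> omega

lemma runAt_nonneg (l : List Int) (i : Int) : 0 ≤ runAt l i := by
  simp [runAt]

-- all-non-prime prefixes are exactly the prefixes of length ≤ runNP
lemma take_all_notPrime (xs : List Int) (k : Nat) (hk : k ≤ xs.length) :
    (pyNotPrime (xs.take k) = true ↔ (k : Int) ≤ (runNP xs : Int)) := by
  induction xs generalizing k with
  | nil => simp [Nat.le_zero.mp hk, pyNotPrime, runNP]
  | cons x xs ih =>
    cases k with
    | zero => simp [pyNotPrime]
    | succ k =>
      simp only [List.take_succ_cons, pyNotPrime, List.all_cons, Bool.and_eq_true,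
        Bool.not_eq_eq_eq_not, Bool.not_true, runNP]
      by_cases hp : pyIsPrime x
      · simp [hp]
      · simp only [List.length_cons] at hk
        have := ih k (by omega)
        simp only [pyNotPrime] at this
        simp [hp, this]

-- generic argmax machinery: f = run length at an index, g = payload
def Mx (f : Int → Int) : List Int → Int
  | [] => 0
  | i :: rest => max (f i) (Mx f rest)

def FA {α : Type} (f : Int → Int) (g : Int → α) (a0 : α) : List Int → α × Int
  | [] => (a0, 0)
  | i :: rest => if Mx f rest ≤ f i then (g i, f i) else FA f g a0 rest

def stepA {α : Type} (f : Int → Int) (g : Int → α) (st : α × Int) (i : Int) : α × Int :=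
  if st.2 < f i ∧ 0 < f i then (g i, f i) else st

def stepGE {α : Type} (f : Int → Int) (g : Int → α) (st : α × Int) (i : Int) : α × Int :=
  if f i ≥ st.2 then (g i, f i) else st

lemma Mx_nonneg (f : Int → Int) (hf : ∀ i, 0 ≤ f i) (xs : List Int) : 0 ≤ Mx f xs := by
  cases xs with
  | nil => simp [Mx]
  | cons i rest => have := hf i; simp only [Mx]; omega

lemma FA_snd {α : Type} (f : Int → Int) (g : Int → α) (a0 : α) (xs : List Int) :
    (FA f g a0 xs).2 = Mx f xs := by
  induction xs with
  | nil => simp [FA, Mx]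
  | cons i rest ih =>
    simp only [FA, Mx]
    split <;> simp_all
    omega

lemma foldl_stepA_no_update {α : Type} (f : Int → Int) (g : Int → α) (xs : List Int) :
    ∀ st : α × Int, Mx f xs ≤ st.2 → xs.foldl (stepA f g) st = st := by
  induction xs with
  | nil => intro st _; rfl
  | cons i rest ih =>
    intro st h
    simp only [Mx] at h
    simp only [List.foldl_cons, stepA]
    rw [if_neg (by omega)]
    exact ih st (by omega)

lemma foldl_stepA_eq_FA {α : Type} (f : Int → Int) (g : Int → α) (a0 : α) (xs : List Int) :
    ∀ (b : α) (m : Int), 0 ≤ m → m < Mx f xs →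
      xs.foldl (stepA f g) (b, m) = FA f g a0 xs := by
  induction xs with
  | nil => intro b m _ h; simp [Mx] at h; omega
  | cons i rest ih =>
    intro b m hm h
    simp only [Mx] at h
    simp only [List.foldl_cons, stepA, FA]
    by_cases hfi : m < f i
    · rw [if_pos ⟨hfi, by omega⟩]
      by_cases hM : Mx f rest ≤ f i
      · rw [if_pos hM]
        exact foldl_stepA_no_update f g rest (g i, f i) hM
      · rw [if_neg hM]
        exact ih (g i) (f i) (by omega) (by omega)
    · rw [if_neg (by omega)]
      have hMr : m < Mx f rest := by omega
      rw [if_neg (by omega)]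
      exact ih b m hm hMr

lemma foldl_stepGE_reverse_eq_FA {α : Type} (f : Int → Int) (g : Int → α) (a0 : α)
    (xs : List Int) : xs.reverse.foldl (stepGE f g) (a0, 0) = FA f g a0 xs := by
  induction xs with
  | nil => rfl
  | cons i rest ih =>
    rw [List.reverse_cons, List.foldl_append, ih]
    simp only [List.foldl_cons, List.foldl_nil, stepGE, FA, ge_iff_le, FA_snd]

-- the two payloads correspond: A carries the slice, B carries the start index
lemma FA_slice_corr (l : List Int) (xs : List Int) :
    (FA (runAt l) (fun i => PySem.List.slice l (some i) (some (i + runAt l i))) [] xs).1 =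
      PySem.List.slice l (some (FA (runAt l) (fun i => i) 0 xs).1)
        (some ((FA (runAt l) (fun i => i) 0 xs).1 + (FA (runAt l) (fun i => i) 0 xs).2)) := by
  induction xs with
  | nil =>
    simp only [FA]
    have : PySem.List.slice l (some (0 : Int)) (some ((0 : Int) + 0)) = [] := by
      have := PySem.List.slice_toNat l (a := 0) (b := 0 + 0) (by omega) (by omega)
      simpa using this
    rw [this]
  | cons i rest ih =>
    simp only [FA]
    split
    · rfl
    · exact ih

-- empty slice when bounds coincide
lemma slice_self_eq_nil (l : List Int) (a : Int) :
    PySem.List.slice l (some a) (some a) = [] := by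
  have h := PySem.List.length_slice l a a
  simp only [Nat.sub_self] at h
  exact List.length_eq_zero_iff.mp h

-- l[i] = l[i+0] :: …, expressed on runAt: the backward-scan recurrence
lemma runAt_step (l : List Int) (k : Nat) (hk : k < l.length) :
    runAt l (k : Int) =
      if pyIsPrime (PySem.List.pyGetD l (k : Int) 0) then 0 else runAt l ((k : Int) + 1) + 1 := by
  rw [PySem.List.pyGetD_natCast, List.getD_eq_getElem l 0 hk]
  simp only [runAt, Int.toNat_natCast]
  rw [List.drop_eq_getElem_cons hk]
  have : ((k : Int) + 1).toNat = k + 1 := by omega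
  rw [this]
  simp only [runNP]
  split <;> simp

-- INNER LOOP of A: the fold over j ∈ range(j0, n) from state (b, m) either finds the full
-- non-prime run starting at i (if it is longer than m and not already passed) or leaves the state
lemma inner_loop (l : List Int) (i : Int) (hi : 0 ≤ i) :
    ∀ (k : Nat) (j : Int), i ≤ j → j = (l.length : Int) - k → ∀ (b : List Int) (m : Int),
      (PySem.List.pyRange j (l.length : Int) 1).foldl (fun (st : List Int × Int) j =>
          let s := PySem.List.slice l (some i) (some (j + 1))
          if (s.length : Int) > st.2 ∧ pyNotPrime s = true then (s, (s.length : Int)) else st)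
        (b, m) =
      if m < runAt l i ∧ j - i < runAt l i then
        (PySem.List.slice l (some i) (some (i + runAt l i)), runAt l i)
      else (b, m) := by
  intro k
  induction k with
  | zero =>
    intro j hij hj b m
    have hrle : runAt l i ≤ (l.length : Int) - i := by
      have h1 := runNP_le (l.drop i.toNat)
      simp only [List.length_drop] at h1
      simp only [runAt]; omega
    rw [PySem.List.pyRange_one_eq_nil (by omega)]
    simp only [List.foldl_nil]
    rw [if_neg (by omega)]
  | succ k ih =>
    intro j hij hj b m
    by_cases hjn : j < (l.length : Int)
    · rw [PySem.List.pyRange_one_cons hjn]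
      simp only [List.foldl_cons]
      have hrle : runAt l i ≤ (l.length : Int) - i := by
        have h1 := runNP_le (l.drop i.toNat)
        simp only [List.length_drop] at h1
        simp only [runAt]; omega
      -- evaluate the body at index j
      have hslice : PySem.List.slice l (some i) (some (j + 1)) =
          (l.drop i.toNat).take ((j + 1).toNat - i.toNat) := by
        exact PySem.List.slice_toNat l hi (by omega)
      have hlen : ((PySem.List.slice l (some i) (some (j + 1))).length : Int) = j + 1 - i := by
        rw [hslice]
        simp only [List.length_take, List.length_drop]
        omega
      have hnp : (pyNotPrime (PySem.List.slice l (some i) (some (j + 1))) = true) ↔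
          (j + 1 - i ≤ runAt l i) := by
        rw [hslice]
        have := take_all_notPrime (l.drop i.toNat) ((j + 1).toNat - i.toNat)
          (by simp only [List.length_drop]; omega)
        rw [this]
        simp only [runAt]
        omega
      by_cases hc : j + 1 - i > m ∧ j + 1 - i ≤ runAt l i
      · rw [if_pos (by rw [hlen, hnp]; exact ⟨hc.1, hc.2⟩)]
        rw [hlen]
        rw [ih (j + 1) (by omega) (by omega) _ _]
        by_cases hlt : j + 1 - i < runAt l i
        · rw [if_pos ⟨by omega, by omega⟩, if_pos ⟨by omega, by omega⟩]
        · -- j + 1 - i = runAt l i : the slice just became the whole run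
          have heq : j + 1 = i + runAt l i := by omega
          rw [if_neg (by omega), if_pos ⟨by omega, by omega⟩, heq]
          simp only [add_sub_cancel_left]
      · rw [if_neg (by rw [hlen, hnp]; exact fun h => hc ⟨h.1, h.2⟩)]
        rw [ih (j + 1) (by omega) (by omega) b m]
        by_cases hgoal : m < runAt l i ∧ j - i < runAt l i
        · rw [if_pos ⟨hgoal.1, by omega⟩, if_pos hgoal]
        · rw [if_neg (by omega), if_neg hgoal]
    · omega

-- OUTER LOOP of A equals the abstract left-to-right strict argmax fold
lemma portA_eq_FA (l : List Int) :
    get_longest_all_not_prime l =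
      ((PySem.List.pyRange 0 (l.length : Int) 1).foldl
        (stepA (runAt l) (fun i => PySem.List.slice l (some i) (some (i + runAt l i))))
        ([], 0)).1 := by
  unfold get_longest_all_not_prime
  congr 1
  apply PySem.List.foldl_congr_mem
  intro st i hi
  have hmem := (PySem.List.mem_pyRange_one.mp hi)
  obtain ⟨st1, st2⟩ := st
  have := inner_loop l i hmem.1 ((l.length : Int) - i).toNat i le_rfl (by omega) st1 st2
  rw [this]
  simp only [stepA, sub_self]

-- B's backward loop: the run component entering index k−1 is runAt l k, and the
-- (best_start, best_len) components follow the abstract ≥-fold over the reversed range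
lemma portB_loop (l : List Int) :
    ∀ (k : Nat), k ≤ l.length → ∀ (bs bl : Int),
      ((PySem.List.pyRange 0 (k : Int) 1).reverse).foldl
        (fun (st : Int × Int × Int) i =>
          let run := if pyIsPrime (PySem.List.pyGetD l i 0) then 0 else st.2.2 + 1
          if run ≥ st.2.1 then (i, run, run) else (st.1, st.2.1, run))
        (bs, bl, runAt l (k : Int)) =
      ((((PySem.List.pyRange 0 (k : Int) 1).reverse).foldl (stepGE (runAt l) (fun i => i)) (bs, bl)).1,
       (((PySem.List.pyRange 0 (k : Int) 1).reverse).foldl (stepGE (runAt l) (fun i => i)) (bs, bl)).2,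
       runAt l 0) := by
  intro k
  induction k with
  | zero =>
    intro _ bs bl
    rw [PySem.List.pyRange_one_eq_nil (by omega)]
    simp
  | succ k ih =>
    intro hk bs bl
    have hcast : ((k + 1 : Nat) : Int) = (k : Int) + 1 := by push_cast; ring
    rw [hcast, PySem.List.pyRange_one_succ_right (by omega), List.reverse_append]
    simp only [List.reverse_cons, List.reverse_nil, List.nil_append, List.cons_append,
      List.foldl_cons]
    have hrun : (if pyIsPrime (PySem.List.pyGetD l (k : Int) 0) then 0
        else runAt l ((k + 1 : Nat) : Int) + 1) = runAt l (k : Int) := by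
      rw [hcast, (runAt_step l k (by omega)).symm]
    rw [hcast] at hrun
    simp only [hrun]
    -- the first step agrees with stepGE, then apply the IH to the updated pair
    by_cases hcond : runAt l (k : Int) ≥ bl
    · rw [if_pos hcond]
      have := ih (by omega) (k : Int) (runAt l (k : Int))
      rw [this]
      simp only [stepGE, ge_iff_le]
      rw [if_pos hcond]
    · rw [if_neg hcond]
      have := ih (by omega) bs bl
      rw [this]
      simp only [stepGE, ge_iff_le]
      rw [if_neg hcond]

lemma portB_eq_FA (l : List Int) :
    get_longest_all_not_prime_alt l =
      PySem.List.slice l (some (FA (runAt l) (fun i => i) 0 (PySem.List.pyRange 0 (l.length : Int) 1)).1)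
        (some ((FA (runAt l) (fun i => i) 0 (PySem.List.pyRange 0 (l.length : Int) 1)).1 +
               (FA (runAt l) (fun i => i) 0 (PySem.List.pyRange 0 (l.length : Int) 1)).2)) := by
  unfold get_longest_all_not_prime_alt
  have hrange : PySem.List.pyRange ((l.length : Int) - 1) (-1) (-1) =
      (PySem.List.pyRange 0 (l.length : Int) 1).reverse := by
    rw [PySem.List.pyRange_neg_one_eq_reverse]
    norm_num
  rw [hrange]
  have hinit : runAt l ((l.length : Nat) : Int) = 0 := by
    simp [runAt, runNP]
  have hB := portB_loop l l.length le_rfl 0 0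
  rw [hinit] at hB
  simp only [hB, foldl_stepGE_reverse_eq_FA]

-- ===== VERDICT (by name: the statement is the Claim_ definition above) =====
theorem get_longest_all_not_prime_spec : Claim_equal_get_longest_all_not_prime := by
  intro l _
  unfold Spec_get_longest_all_not_prime
  rw [portA_eq_FA, portB_eq_FA]
  set f := runAt l with hf
  set idxs := PySem.List.pyRange 0 (l.length : Int) 1 with hidxs
  have hfnn : ∀ i, 0 ≤ f i := runAt_nonneg l
  by_cases hM : Mx f idxs ≤ 0
  · -- no positive run anywhere: A keeps ([], 0), B slices an empty segment
    rw [foldl_stepA_no_update]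
    · have h2 := FA_snd f (fun i => i) 0 idxs
      have : (FA f (fun i => i) 0 idxs).2 = 0 := by
        have := Mx_nonneg f hfnn idxs
        omega
      rw [this]
      simp only [add_zero]
      exact (slice_self_eq_nil l _).symm
    · simpa using hM
  · rw [foldl_stepA_eq_FA f _ [] idxs [] 0 le_rfl (by omega)]
    exact FA_slice_corr l idxs
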